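-- pv_equiv track=rewrite | github.com/the-omega-institute/automath | theory/2026_golden_ratio_driven_scan_projection_generation_recursive_emergence/scripts/exp_fold_zm_hard_boundary_coeffs_audit.py | _check_polynomial_by_differences
-- ===== SOURCE A (Python) =====
-- from typing import Dict, List, Tuple
--
-- def forward_differences(values: List[int]) -> List[List[int]]:
--     diffs: List[List[int]] = [values[:]]
--     while len(diffs[-1]) >= 2:
--         prev = diffs[-1]
--         diffs.append([prev[i + 1] - prev[i] for i in range(len(prev) - 1)])
--     return diffs
--
-- def _check_polynomial_by_differences(values: List[int], degree: int) -> Tuple[bool, List[int]]: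
--     """Return (ok, c_r) where c_r = Delta^r f(0) for r=0..degree (Newton/binomial basis)."""
--     if degree < 0:
--         raise ValueError("degree must be non-negative")
--     diffs = forward_differences(values)
--     # Need at least degree+2 points to check (degree+1)-th differences on at least one entry.
--     if len(values) < degree + 2:
--         return False, []
--     # (degree+1)-th differences must be identically zero if polynomial degree <= degree.
--     level = degree + 1
--     ok = True
--     if level < len(diffs):
--         if any(x != 0 for x in diffs[level]):
--             ok = False
--     else:
--         ok = False
--     c = [diffs[r][0] for r in range(min(degree, len(diffs) - 1) + 1)]
--     return ok, c
-- ===== SOURCE B (Python) =====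
-- from typing import List, Tuple
--
-- def _comb(n: int, k: int) -> int:
--     # binomial coefficient, multiplicative formula (exact integer division)
--     if k < 0 or k > n:
--         return 0
--     c = 1
--     for i in range(k):
--         c = c * (n - i) // (i + 1)
--     return c
--
-- def _check_polynomial_by_differences(values: List[int], degree: int) -> Tuple[bool, List[int]]:
--     """Return (ok, c_r) where c_r = Delta^r f(0) for r=0..degree (Newton/binomial basis)."""
--     if degree < 0:
--         raise ValueError("degree must be non-negative")
--     n = len(values)
--     if n < degree + 2:
--         return False, []
--     # c_r via the binomial transform: c_r = sum_k (-1)^(r-k) C(r,k) values[k]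
--     c = [sum((-1) ** (r - k) * _comb(r, k) * values[k] for k in range(r + 1))
--          for r in range(degree + 1)]
--     # ok iff values coincide with their Newton form of degree <= degree
--     ok = all(values[m] == sum(c[r] * _comb(m, r) for r in range(degree + 1))
--              for m in range(n))
--     return ok, c
-- ===== Notes on version B (the rewrite author's own statement) =====
-- stated objective: alternative
-- what changed: Instead of building the full nested forward-difference table and inspecting its (degree+1)-th row, B computes the Newton coefficients c_r directly by the integer binomial transform c_r = sum_k (-1)^(r-k) C(r,k) values[k] and sets ok by reconstructing every value from the Newton form values[m] ?= sum_r c_r C(m,r).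
import Mathlib
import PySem

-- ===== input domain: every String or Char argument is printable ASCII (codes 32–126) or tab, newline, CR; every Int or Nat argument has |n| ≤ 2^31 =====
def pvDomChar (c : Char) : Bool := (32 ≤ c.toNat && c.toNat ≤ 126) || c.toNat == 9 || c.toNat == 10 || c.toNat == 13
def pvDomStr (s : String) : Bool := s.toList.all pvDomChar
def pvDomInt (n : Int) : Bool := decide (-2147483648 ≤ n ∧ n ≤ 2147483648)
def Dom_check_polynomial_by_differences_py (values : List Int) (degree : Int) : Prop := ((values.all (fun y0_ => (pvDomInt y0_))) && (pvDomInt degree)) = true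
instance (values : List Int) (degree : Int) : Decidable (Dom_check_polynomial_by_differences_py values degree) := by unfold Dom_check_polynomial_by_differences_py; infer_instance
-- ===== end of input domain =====

-- B replaces A's nested forward-difference table by the closed-form binomial transform
-- (c_r = Σ_k (-1)^(r-k) C(r,k)·values[k]) plus a Newton-form reconstruction check (alternative algorithm, same cost class).

-- ===== PORT A =====
-- the comprehension [prev[i+1] - prev[i] for i in range(len(prev) - 1)]; indices are always in range, so getD is exact
def pvPdiff (prev : List Int) : List Int :=
  (List.range (prev.length - 1)).map (fun i => prev.getD (i + 1) 0 - prev.getD i 0)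

theorem pvPdiff_length (prev : List Int) : (pvPdiff prev).length = prev.length - 1 := by
  simp [pvPdiff]

-- the while loop of forward_differences: diffs = [values], then append pairwise differences while the last row has ≥ 2 entries
def forward_differences_py (cur : List Int) : List (List Int) :=
  if 2 ≤ cur.length then cur :: forward_differences_py (pvPdiff cur) else [cur]
termination_by cur.length
decreasing_by simp only [pvPdiff_length]; omega

def check_polynomial_by_differences_py (values : List Int) (degree : Int) : Bool × List Int :=
  -- 'if degree < 0: raise ValueError' — those inputs are excluded by Pre_
  let diffs := forward_differences_py values
  if (values.length : Int) < degree + 2 then (false, [])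
  else
    let level : Int := degree + 1
    let ok : Bool :=
      if level < (diffs.length : Int) then
        if (PySem.List.pyGetD diffs level []).any (fun x => decide (x ≠ 0)) then false else true
      else false
    let c := (List.range (min degree ((diffs.length : Int) - 1) + 1).toNat).map
        (fun (r : Nat) => PySem.List.pyGetD (PySem.List.pyGetD diffs (r : Int) []) 0 0)
    (ok, c)

-- ===== PORT B =====
-- Source B's _comb: multiplicative formula with exact integer floor division
def pvCombI (n k : Int) : Int :=
  if k < 0 ∨ n < k then 0
  else (List.range k.toNat).foldl (fun (c : Int) (i : Nat) => PySem.Int.floordiv (c * (n - (i : Int))) ((i : Int) + 1)) 1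

def check_polynomial_by_differences_py_alt (values : List Int) (degree : Int) : Bool × List Int :=
  -- 'if degree < 0: raise ValueError' — those inputs are excluded by Pre_
  if (values.length : Int) < degree + 2 then (false, [])
  else
    let c := (List.range (degree + 1).toNat).map (fun r =>
      ((List.range (r + 1)).map (fun k =>
        (-1 : Int) ^ (r - k) * pvCombI (r : Int) (k : Int) * values.getD k 0)).sum)
    let ok := (List.range values.length).all (fun m =>
      decide (values.getD m 0 =
        ((List.range (degree + 1).toNat).map (fun r => c.getD r 0 * pvCombI (m : Int) (r : Int))).sum))
    (ok, c)

-- ===== PRECONDITION & SPEC =====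
-- Pre_ excludes exactly degree < 0, where the Python A raises ValueError
def Pre_check_polynomial_by_differences_py (values : List Int) (degree : Int) : Prop := 0 ≤ degree
instance (values : List Int) (degree : Int) : Decidable (Pre_check_polynomial_by_differences_py values degree) := by unfold Pre_check_polynomial_by_differences_py; infer_instance

def pvWitness_check_polynomial_by_differences_py : List Int × Int := ([1, 3], 0)

def Spec_check_polynomial_by_differences_py (values : List Int) (degree : Int) (out : Bool × List Int) : Prop := out = check_polynomial_by_differences_py_alt values degree
instance (values : List Int) (degree : Int) (out : Bool × List Int) : Decidable (Spec_check_polynomial_by_differences_py values degree out) := by unfold Spec_check_polynomial_by_differences_py; infer_instance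

-- ===== CLAIM (what is proved, stated in full; the proofs are below) =====
def Claim_equal_check_polynomial_by_differences_py : Prop := ∀ (values : List Int) (degree : Int), Dom_check_polynomial_by_differences_py values degree → Pre_check_polynomial_by_differences_py values degree → Spec_check_polynomial_by_differences_py values degree (check_polynomial_by_differences_py values degree)

-- ===== LEMMAS AND PROOFS =====

theorem pvPdiff_getD (prev : List Int) (i : Nat) (h : i + 1 < prev.length) :
    (pvPdiff prev).getD i 0 = prev.getD (i + 1) 0 - prev.getD i 0 := by
  have hi : i < prev.length - 1 := by omega
  simp [pvPdiff, List.getD_eq_getElem?_getD, hi]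

theorem pdiffIter_length (r : Nat) (v : List Int) : (pvPdiff^[r] v).length = v.length - r := by
  induction r with
  | zero => simp
  | succ r ih =>
    rw [Function.iterate_succ_apply', pvPdiff_length, ih]; omega

theorem fd_eq (v : List Int) (hv : v ≠ []) :
    forward_differences_py v = (List.range v.length).map (fun r => pvPdiff^[r] v) := by
  induction v using forward_differences_py.induct with
  | case1 cur h2 ih =>
    rw [forward_differences_py]
    have hne : pvPdiff cur ≠ [] := by
      have := pvPdiff_length cur
      intro hc; rw [hc] at this; simp at this; omega
    · rw [if_pos h2, ih hne, pvPdiff_length]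
      have hlen : cur.length = (cur.length - 1) + 1 := by omega
      conv_rhs => rw [hlen, List.range_succ_eq_map]
      simp [Function.iterate_succ_apply, Function.comp_def]
  | case2 cur h2 =>
    rw [forward_differences_py, if_neg h2]
    have h1 : cur.length = 1 := by
      have : cur.length ≠ 0 := by simpa using hv
      omega
    simp [h1]

theorem pdiffIter_getD (v : List Int) (r i : Nat) (h : i + r < v.length) :
    (pvPdiff^[r] v).getD i 0 = (fwdDiff (1 : ℕ))^[r] (fun j => v.getD j 0) i := by
  induction r generalizing i with
  | zero => simp
  | succ r ih =>
    rw [Function.iterate_succ_apply', Function.iterate_succ_apply' (fwdDiff 1)]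
    have hlen : (pvPdiff^[r] v).length = v.length - r := pdiffIter_length r v
    rw [pvPdiff_getD _ _ (by omega)]
    rw [ih (i + 1) (by omega), ih i (by omega)]
    simp [fwdDiff]

theorem listSum_range (f : ℕ → ℤ) (n : ℕ) :
    ((List.range n).map f).sum = ∑ k ∈ Finset.range n, f k := by
  induction n with
  | zero => simp
  | succ n ih => rw [List.range_succ, Finset.sum_range_succ]; simp [ih]

theorem pvCombI_natCast (n k : Nat) : pvCombI (n : Int) (k : Int) = (n.choose k : Int) := by
  unfold pvCombI
  by_cases hk : k ≤ n
  · rw [if_neg (by push_cast; omega)]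
    rw [Int.toNat_natCast]
    have key : ∀ j, j ≤ n → (List.range j).foldl (fun (c : Int) (i : Nat) => PySem.Int.floordiv (c * ((n:Int) - (i : Int))) ((i : Int) + 1)) 1 = (n.choose j : Int) := by
      intro j
      induction j with
      | zero => simp
      | succ j ih =>
        intro hj
        rw [List.range_succ, List.foldl_append, ih (by omega)]
        simp only [List.foldl_cons, List.foldl_nil]
        have hsub : (n : Int) - (j : Int) = ((n - j : Nat) : Int) := by omega
        have hch : n.choose j * (n - j) = n.choose (j+1) * (j+1) := (Nat.choose_succ_right_eq n j).symm
        rw [hsub]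
        rw [show ((n.choose j : Int)) * ((n - j : Nat) : Int) = ((n.choose j * (n - j) : Nat) : Int) by push_cast; ring]
        rw [hch]
        rw [show ((j : Int) + 1) = ((j + 1 : Nat) : Int) by push_cast; ring]
        rw [PySem.Int.floordiv_natCast]
        rw [Nat.mul_div_cancel _ (by omega)]
    exact key k hk
  · rw [if_pos (by push_cast; omega), Nat.choose_eq_zero_of_lt (by omega)]
    simp

theorem fd_const_zero (t : ℕ) : (fwdDiff (1 : ℕ))^[t] (fun _ : ℕ => (0 : ℤ)) = fun _ => 0 := by
  induction t with
  | zero => simp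
  | succ t ih => rw [Function.iterate_succ_apply, fwdDiff_const, ih]

theorem choose_vanish (r s : Nat) (h : r < s) :
    (fwdDiff (1 : ℕ))^[s] (fun x => ((x.choose r : ℕ) : ℤ)) = fun _ => 0 := by
  rw [show s = (s - r - 1) + 1 + r by omega, Function.iterate_add_apply]
  have h1 : (fwdDiff (1 : ℕ))^[r] (fun x => ((x.choose r : ℕ) : ℤ)) = fun x => ((x.choose 0 : ℕ) : ℤ) := by
    have := fwdDiff_iter_choose 0 r
    simpa using this
  rw [h1]
  have h2 : (fun x : ℕ => ((x.choose 0 : ℕ) : ℤ)) = fun _ : ℕ => (1 : ℤ) := by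
    funext x; simp
  rw [h2, Function.iterate_succ_apply, fwdDiff_const, fd_const_zero]

theorem fd_congr (f g : ℕ → ℤ) (s i : Nat) (h : ∀ j, i ≤ j → j ≤ i + s → f j = g j) :
    (fwdDiff (1 : ℕ))^[s] f i = (fwdDiff (1 : ℕ))^[s] g i := by
  rw [fwdDiff_iter_eq_sum_shift, fwdDiff_iter_eq_sum_shift]
  apply Finset.sum_congr rfl
  intro k hk
  rw [Finset.mem_range] at hk
  have : f (i + k • 1) = g (i + k • 1) := h _ (by omega) (by simp; omega)
  rw [this]

theorem zero_prop (f : ℕ → ℤ) (n d : Nat)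
    (hA : ∀ i, i + (d + 1) < n → (fwdDiff (1 : ℕ))^[d + 1] f i = 0) :
    ∀ t i, i + (d + 1 + t) < n → (fwdDiff (1 : ℕ))^[d + 1 + t] f i = 0 := by
  intro t
  induction t with
  | zero => intro i hi; exact hA i (by omega)
  | succ t ih =>
    intro i hi
    rw [show d + 1 + (t + 1) = (d + 1 + t) + 1 by omega, Function.iterate_succ_apply']
    have h1 : (fwdDiff (1 : ℕ))^[d + 1 + t] f (i + 1) = 0 := ih (i + 1) (by omega)
    have h2 : (fwdDiff (1 : ℕ))^[d + 1 + t] f i = 0 := ih i (by omega)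
    simp [fwdDiff, h1, h2]

theorem dir1 (f : ℕ → ℤ) (n d : Nat)
    (hA : ∀ i, i + (d + 1) < n → (fwdDiff (1 : ℕ))^[d + 1] f i = 0) :
    ∀ m, m < n → f m = ∑ r ∈ Finset.range (d + 1), ((fwdDiff (1 : ℕ))^[r] f 0) * (m.choose r) := by
  intro m hm
  have newton := shift_eq_sum_fwdDiff_iter (1 : ℕ) f m 0
  simp only [zero_add, smul_eq_mul, mul_one, nsmul_eq_mul] at newton
  have newton' : f m = ∑ r ∈ Finset.range (m + 1), ((fwdDiff (1 : ℕ))^[r] f 0) * (m.choose r) := by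
    rw [newton]
    exact Finset.sum_congr rfl (fun r _ => mul_comm _ _)
  rw [newton']
  rcases le_or_gt (m + 1) (d + 1) with hle | hgt
  · exact Finset.sum_subset (fun x hx => by rw [Finset.mem_range] at *; omega) (by
      intro x _ hx
      rw [Finset.mem_range, not_lt] at hx
      rw [Nat.choose_eq_zero_of_lt (by omega)]
      simp)
  · refine (Finset.sum_subset (fun x hx => by rw [Finset.mem_range] at *; omega) ?_).symm
    intro x hx1 hx2
    rw [Finset.mem_range] at hx1
    rw [Finset.mem_range, not_lt] at hx2
    have hz : (fwdDiff (1 : ℕ))^[x] f 0 = 0 := by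
      have := zero_prop f n d hA (x - (d + 1)) 0 (by omega)
      rwa [show d + 1 + (x - (d + 1)) = x by omega] at this
    rw [hz, zero_mul]

theorem dir2 (f : ℕ → ℤ) (n d : Nat)
    (hB : ∀ m, m < n → f m = ∑ r ∈ Finset.range (d + 1), ((fwdDiff (1 : ℕ))^[r] f 0) * (m.choose r)) :
    ∀ i, i + (d + 1) < n → (fwdDiff (1 : ℕ))^[d + 1] f i = 0 := by
  intro i hi
  set g : ℕ → ℤ := fun x => ∑ r ∈ Finset.range (d + 1), ((fwdDiff (1 : ℕ))^[r] f 0) * (x.choose r) with hg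
  have hfg : (fwdDiff (1 : ℕ))^[d + 1] f i = (fwdDiff (1 : ℕ))^[d + 1] g i := by
    apply fd_congr
    intro j hj1 hj2
    exact hB j (by omega)
  rw [hfg]
  have hgsum : g = ∑ r ∈ Finset.range (d + 1), ((fwdDiff (1 : ℕ))^[r] f 0) • (fun x => ((x.choose r : ℕ) : ℤ)) := by
    funext x
    simp [hg, Finset.sum_apply]
  rw [hgsum, fwdDiff_iter_finset_sum]
  rw [Finset.sum_apply]
  apply Finset.sum_eq_zero
  intro r hr
  rw [Finset.mem_range] at hr
  rw [fwdDiff_iter_const_smul, choose_vanish r (d + 1) (by omega)]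
  simp

theorem getD_map_range {α : Type} (F : ℕ → α) (n i : ℕ) (dflt : α) (h : i < n) :
    ((List.range n).map F).getD i dflt = F i := by
  simp [List.getD_eq_getElem?_getD, h]

theorem main_eq (values : List Int) (degree : Int) (hPre : 0 ≤ degree) :
    check_polynomial_by_differences_py values degree = check_polynomial_by_differences_py_alt values degree := by
  unfold check_polynomial_by_differences_py check_polynomial_by_differences_py_alt
  by_cases hlt : (values.length : Int) < degree + 2
  · simp only [hlt, if_pos]
  · have hd : degree = ((degree.toNat : Nat) : Int) := (Int.toNat_of_nonneg hPre).symm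
    set d := degree.toNat with hdd
    set n := values.length with hnn
    have hlt' := not_lt.mp hlt
    have hn : d + 2 ≤ n := by omega
    have hne : values ≠ [] := List.ne_nil_of_length_pos (by rw [← hnn]; omega)
    simp only [if_neg hlt]
    rw [fd_eq values hne]
    set f : ℕ → ℤ := fun j => values.getD j 0 with hf
    simp only [List.length_map, List.length_range]
    rw [if_pos (show degree + 1 < (n : Int) by omega)]
    rw [show degree + 1 = (((d + 1 : Nat) : Int)) by omega]
    rw [show min degree ((n : Int) - 1) + 1 = (((d + 1 : Nat) : Int)) by
      rw [min_eq_left (by omega)]; omega]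
    rw [Int.toNat_natCast, PySem.List.pyGetD_natCast, getD_map_range _ _ _ _ (by omega)]
    have hcA : (List.range (d + 1)).map
          (fun (r : Nat) => PySem.List.pyGetD (PySem.List.pyGetD ((List.range n).map (fun r => pvPdiff^[r] values)) (r : Int) []) 0 0)
        = (List.range (d + 1)).map (fun r => (fwdDiff (1 : ℕ))^[r] f 0) := by
      apply List.map_congr_left
      intro r hr
      rw [List.mem_range] at hr
      rw [PySem.List.pyGetD_natCast, getD_map_range _ _ _ _ (by omega), PySem.List.pyGetD_zero]
      exact pdiffIter_getD values r 0 (by omega)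
    have hcB : (List.range (d + 1)).map (fun r =>
          ((List.range (r + 1)).map (fun k =>
            (-1 : Int) ^ (r - k) * pvCombI (r : Int) (k : Int) * values.getD k 0)).sum)
        = (List.range (d + 1)).map (fun r => (fwdDiff (1 : ℕ))^[r] f 0) := by
      apply List.map_congr_left
      intro r hr
      rw [listSum_range, fwdDiff_iter_eq_sum_shift]
      apply Finset.sum_congr rfl
      intro k hk
      rw [pvCombI_natCast]
      simp [smul_eq_mul, mul_assoc, hf]
    rw [hcA, hcB]
    apply Prod.ext
    swap
    · rfl
    · show (if ((pvPdiff^[d + 1] values).any fun x => decide (x ≠ 0)) = true then false else true) = _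
      have hrowlen : (pvPdiff^[d + 1] values).length = n - (d + 1) := pdiffIter_length _ _
      rw [Bool.eq_iff_iff]
      constructor
      · intro hA'
        have hzero : ∀ i, i + (d + 1) < n → (fwdDiff (1 : ℕ))^[d + 1] f i = 0 := by
          intro i hi
          rw [← pdiffIter_getD values (d + 1) i (by omega)]
          by_cases hany : ((pvPdiff^[d + 1] values).any fun x => decide (x ≠ 0)) = true
          · rw [if_pos hany] at hA'; exact absurd hA' (by simp)
          · rw [Bool.not_eq_true, List.any_eq_false] at hany
            have hmem : (pvPdiff^[d + 1] values).getD i 0 ∈ pvPdiff^[d + 1] values := by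
              rw [List.getD_eq_getElem _ _ (by omega)]
              exact List.getElem_mem _
            have := hany _ hmem
            simpa using this
        have hB' := dir1 f n d (by intro i hi; exact hzero i hi)
        rw [List.all_eq_true]
        intro m hm
        rw [List.mem_range] at hm
        rw [decide_eq_true_iff]
        rw [show (values.getD m 0) = f m from rfl]
        rw [hB' m hm, listSum_range]
        apply Finset.sum_congr rfl
        intro r hr
        rw [Finset.mem_range] at hr
        rw [getD_map_range _ _ _ _ (by omega), pvCombI_natCast]
      · intro hB'
        have hBm : ∀ m, m < n → f m = ∑ r ∈ Finset.range (d + 1), ((fwdDiff (1 : ℕ))^[r] f 0) * (m.choose r) := by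
          intro m hm
          rw [List.all_eq_true] at hB'
          have := hB' m (by rw [List.mem_range]; omega)
          rw [decide_eq_true_iff] at this
          rw [show (f m) = values.getD m 0 from rfl, this, listSum_range]
          apply Finset.sum_congr rfl
          intro r hr
          rw [Finset.mem_range] at hr
          rw [getD_map_range _ _ _ _ (by omega), pvCombI_natCast]
        have hA' := dir2 f n d hBm
        have hallz : ∀ x ∈ pvPdiff^[d + 1] values, x = 0 := by
          intro x hx
          obtain ⟨i, hi, rfl⟩ := List.mem_iff_getElem.mp hx
          rw [← List.getD_eq_getElem _ 0 hi]
          rw [pdiffIter_getD values (d + 1) i (by omega)]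
          exact hA' i (by omega)
        rw [if_neg (by simp; intro x hx; exact hallz x hx)]

-- ===== VERDICT (by name: the statement is the Claim_ definition above) =====
theorem check_polynomial_by_differences_py_spec : Claim_equal_check_polynomial_by_differences_py := by
  intro values degree _hDom hPre
  unfold Spec_check_polynomial_by_differences_py
  exact main_eq values degree hPre
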